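-- pv_equiv track=rewrite | github.com/akashchauhan99/Python-Assignments | GetCheckOutTime.py | get_checkout_time
-- ===== SOURCE A (Python) =====
-- def get_checkout_time(customers, registers):
--     tills = {}
--     if registers == 1:
-- 	    return sum(customers)
--     if len(customers) <= registers:
--     	return max(customers)
--     for i in range(registers):
--     	tills[i] = customers[i]
--     for j in range(registers, len(customers)):
--     	next_open = min(tills, key=tills.get)
--     	tills[next_open] += customers[j]
--     return max(tills.values())
-- ===== SOURCE B (Python) =====
-- def _pq_insert(pq, entry):
--     # insert entry into pq (kept sorted in strictly DEcreasing tuple order)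
--     lo, hi = 0, len(pq)
--     while lo < hi:
--         mid = (lo + hi) // 2
--         if pq[mid] > entry:
--             lo = mid + 1
--         else:
--             hi = mid
--     pq.insert(lo, entry)
--
--
-- def get_checkout_time(customers, registers):
--     if registers == 1:
--         return sum(customers)
--     if len(customers) <= registers:
--         return max(customers)
--     # priority queue of (load, register_index) pairs, sorted decreasing,
--     # so the least-loaded register (smallest index on ties) sits at the end
--     pq = []
--     for i in range(registers):
--         _pq_insert(pq, (customers[i], i))
--     for c in customers[registers:]:
--         load, i = pq.pop()
--         _pq_insert(pq, (load + c, i))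
--     return max(load for load, _ in pq)
-- ===== Notes on version B (the rewrite author's own statement) =====
-- stated objective: faster
-- what changed: Replaces A's per-customer linear min-scan over the register dict (min(tills, key=tills.get)) by a priority queue kept as a decreasingly sorted list: the least-loaded register is popped from the end in O(1) and re-inserted by hand-written binary search, so each step does O(log r) comparisons plus one C-level memmove instead of r interpreted key calls.
import Mathlib
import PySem

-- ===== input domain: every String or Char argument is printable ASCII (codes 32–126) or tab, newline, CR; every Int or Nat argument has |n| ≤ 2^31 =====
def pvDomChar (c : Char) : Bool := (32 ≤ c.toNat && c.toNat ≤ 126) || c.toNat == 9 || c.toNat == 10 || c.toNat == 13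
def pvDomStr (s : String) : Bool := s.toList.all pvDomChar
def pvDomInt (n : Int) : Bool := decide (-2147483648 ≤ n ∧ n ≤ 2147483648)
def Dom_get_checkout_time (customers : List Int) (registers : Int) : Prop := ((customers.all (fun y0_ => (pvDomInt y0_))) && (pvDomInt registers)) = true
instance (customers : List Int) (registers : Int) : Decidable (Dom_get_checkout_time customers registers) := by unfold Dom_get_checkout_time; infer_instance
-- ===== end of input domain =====

-- B replaces A's per-customer linear min-scan over the register dict by a priority queue
-- kept as a decreasingly sorted list (pop from the end, re-insert by binary search).

-- ===== PORT A =====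
def get_checkout_time (customers : List Int) (registers : Int) : Int :=
  -- tills = {}; if registers == 1: return sum(customers)
  if registers = 1 then customers.sum
  -- if len(customers) <= registers: return max(customers)  (raises on [], excluded by Pre_)
  else if PySem.List.len customers ≤ registers then (PySem.List.max? customers (fun x => x)).getD 0
  else
    -- for i in range(registers): tills[i] = customers[i]
    let tills : PySem.Dict Int Int :=
      (PySem.List.pyRange 0 registers).foldl
        (fun d i => d.insert i (PySem.List.pyGetD customers i 0)) PySem.Dict.empty
    -- for j in range(registers, len(customers)):
    --     next_open = min(tills, key=tills.get); tills[next_open] += customers[j]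
    -- (min on an empty dict raises, excluded by Pre_; the none branch is unreachable there)
    let tills :=
      (PySem.List.pyRange registers (PySem.List.len customers)).foldl
        (fun d j =>
          match PySem.List.min? d.keys (fun k => d.getD k 0) with
          | some next_open => d.modify next_open 0 (fun v => v + PySem.List.pyGetD customers j 0)
          | none => d) tills
    -- return max(tills.values())
    (PySem.List.max? tills.values (fun x => x)).getD 0

-- ===== PORT B =====
-- Python tuple comparison pq[mid] > entry on (Int, Int) pairs: lexicographic
def pvPqGt (p q : Int × Int) : Bool := decide (q.1 < p.1) || (decide (p.1 = q.1) && decide (q.2 < p.2))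

-- the 'lo, hi = 0, len(pq); while lo < hi: …' binary-search loop of _pq_insert
def pvBpos (pq : List (Int × Int)) (e : Int × Int) (lo hi : Nat) : Nat :=
  if _h : lo < hi then
    let mid := (lo + hi) / 2
    if pvPqGt (pq.getD mid (0, 0)) e then pvBpos pq e (mid + 1) hi
    else pvBpos pq e lo mid
  else lo
termination_by hi - lo
decreasing_by all_goals omega

-- _pq_insert(pq, entry)
def pvPqInsert (pq : List (Int × Int)) (e : Int × Int) : List (Int × Int) :=
  PySem.List.insert pq (pvBpos pq e 0 pq.length) e

def get_checkout_time_alt (customers : List Int) (registers : Int) : Int :=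
  if registers = 1 then customers.sum
  else if PySem.List.len customers ≤ registers then (PySem.List.max? customers (fun x => x)).getD 0
  else
    -- pq = []; for i in range(registers): _pq_insert(pq, (customers[i], i))
    let pq : List (Int × Int) :=
      (PySem.List.pyRange 0 registers).foldl
        (fun pq i => pvPqInsert pq (PySem.List.pyGetD customers i 0, i)) []
    -- for c in customers[registers:]: load, i = pq.pop(); _pq_insert(pq, (load + c, i))
    -- (pop on an empty pq raises, excluded by Pre_; the none branch is unreachable there)
    let pq :=
      (PySem.List.slice customers (some registers) none).foldl
        (fun pq c =>
          match PySem.List.pop? pq with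
          | some (e, rest) => pvPqInsert rest (e.1 + c, e.2)
          | none => pq) pq
    -- return max(load for load, _ in pq)
    (PySem.List.max? (pq.map Prod.fst) (fun x => x)).getD 0

-- ===== PRECONDITION & SPEC =====
-- Pre_ excludes exactly the inputs where A raises: registers == 1 always returns (sum);
-- otherwise an empty customers list reaches max([]) (ValueError) and registers <= 0
-- reaches min({}) (ValueError).
def Pre_get_checkout_time (customers : List Int) (registers : Int) : Prop :=
  registers = 1 ∨ (customers ≠ [] ∧ 2 ≤ registers)
instance (customers : List Int) (registers : Int) : Decidable (Pre_get_checkout_time customers registers) := by unfold Pre_get_checkout_time; infer_instance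

def pvWitness_get_checkout_time : List Int × Int := ([5, 3, 4, 1, 2, 7], 3)

def Spec_get_checkout_time (customers : List Int) (registers : Int) (out : Int) : Prop := out = get_checkout_time_alt customers registers
instance (customers : List Int) (registers : Int) (out : Int) : Decidable (Spec_get_checkout_time customers registers out) := by unfold Spec_get_checkout_time; infer_instance

-- ===== CLAIM (what is proved, stated in full; the proofs are below) =====
def Claim_equal_get_checkout_time : Prop := ∀ (customers : List Int) (registers : Int), Dom_get_checkout_time customers registers → Pre_get_checkout_time customers registers → Spec_get_checkout_time customers registers (get_checkout_time customers registers)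

-- ===== LEMMAS AND PROOFS =====

def pvLt (p q : Int × Int) : Prop := p.1 < q.1 ∨ (p.1 = q.1 ∧ p.2 < q.2)
theorem pvLt_iff (p q : Int × Int) : pvPqGt p q = true ↔ pvLt q p := by
  simp [pvPqGt, pvLt]; omega
theorem pvLt_trans {a b c : Int × Int} (h1 : pvLt a b) (h2 : pvLt b c) : pvLt a c := by
  unfold pvLt at *; omega
theorem pvLt_total {a b : Int × Int} (h : a ≠ b) : pvLt a b ∨ pvLt b a := by
  unfold pvLt
  rcases a with ⟨a1, a2⟩; rcases b with ⟨b1, b2⟩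
  simp only [ne_eq, Prod.mk.injEq, not_and] at h
  by_cases h1 : a1 = b1
  · have := h h1; omega
  · omega
def pvDesc (q : List (Int × Int)) : Prop := q.Pairwise (fun a b => pvLt b a)

theorem pvBpos_spec (q : List (Int × Int)) (e : Int × Int)
    (mono : ∀ i j, i ≤ j → j < q.length → pvLt e (q.getD j (0,0)) → pvLt e (q.getD i (0,0))) :
    ∀ (k lo hi : Nat), hi - lo ≤ k → lo ≤ hi → hi ≤ q.length →
    (∀ j, j < lo → pvLt e (q.getD j (0,0))) →
    (∀ j, hi ≤ j → j < q.length → ¬ pvLt e (q.getD j (0,0))) →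
    pvBpos q e lo hi ≤ q.length ∧
    (∀ j, j < pvBpos q e lo hi → pvLt e (q.getD j (0,0))) ∧
    (∀ j, pvBpos q e lo hi ≤ j → j < q.length → ¬ pvLt e (q.getD j (0,0))) := by
  intro k
  induction k with
  | zero =>
    intro lo hi hk hlh hhl hbefore hafter
    have heq : lo = hi := by omega
    subst heq
    rw [pvBpos, dif_neg (lt_irrefl lo)]
    exact ⟨by omega, hbefore, hafter⟩
  | succ k ih =>
    intro lo hi hk hlh hhl hbefore hafter
    by_cases hlt : lo < hi
    · rw [pvBpos, dif_pos hlt]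
      by_cases hg : pvPqGt (q.getD ((lo + hi) / 2) (0,0)) e
      · simp only [hg]
        have hm : pvLt e (q.getD ((lo + hi) / 2) (0,0)) := (pvLt_iff _ _).mp hg
        refine ih ((lo + hi) / 2 + 1) hi (by omega) (by omega) hhl ?_ hafter
        intro j hj
        exact mono j ((lo + hi) / 2) (by omega) (by omega) hm
      · simp only [hg]
        have hm : ¬ pvLt e (q.getD ((lo + hi) / 2) (0,0)) := fun h => hg ((pvLt_iff _ _).mpr h)
        refine ih lo ((lo + hi) / 2) (by omega) (by omega) (by omega) hbefore ?_
        intro j hj hjl hcon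
        exact hm (mono ((lo + hi) / 2) j hj hjl hcon)
    · rw [pvBpos, dif_neg hlt]
      have heq : lo = hi := by omega
      subst heq
      exact ⟨by omega, hbefore, hafter⟩

theorem pvInsert_eq {α : Type} (q : List α) (p : Nat) (hp : p ≤ q.length) (e : α) :
    PySem.List.insert q (p : Int) e = q.take p ++ e :: q.drop p := by
  simp only [PySem.List.insert, PySem.List.sliceIndices]
  have hcl : (if (p:Int) < 0 then max ((p:Int) + (q.length:Int)) 0
      else min (p:Int) (q.length:Int)).toNat = p := by
    rw [if_neg (by omega : ¬ ((p:Int) < 0))]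
    omega
  norm_num
  rw [hcl]

theorem pvPqInsert_spec (q : List (Int × Int)) (e : Int × Int)
    (hdesc : pvDesc q) (hne : ∀ x ∈ q, x ≠ e) :
    pvDesc (pvPqInsert q e) ∧ (pvPqInsert q e).Perm (e :: q) := by
  have hpw := (List.pairwise_iff_getElem).mp hdesc
  have mono : ∀ i j, i ≤ j → j < q.length → pvLt e (q.getD j (0,0)) → pvLt e (q.getD i (0,0)) := by
    intro i j hij hj he
    rcases Nat.eq_or_lt_of_le hij with rfl | hij'
    · exact he
    · have hg := hpw i j (by omega) hj hij'
      rw [List.getD_eq_getElem q _ hj] at he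
      rw [List.getD_eq_getElem q _ (by omega)]
      exact pvLt_trans he hg
  obtain ⟨hple, hbef, haft⟩ := pvBpos_spec q e mono q.length 0 q.length (by omega) (by omega) le_rfl
    (by omega) (by intro j h1 h2; omega)
  set p := pvBpos q e 0 q.length with hp
  have heq : pvPqInsert q e = q.take p ++ e :: q.drop p := by
    unfold pvPqInsert
    rw [← hp]
    exact pvInsert_eq q p hple e
  have hperm : (pvPqInsert q e).Perm (e :: q) := by
    rw [heq]
    have h1 : (q.take p ++ e :: q.drop p).Perm (e :: (q.take p ++ q.drop p)) := List.perm_middle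
    rw [List.take_append_drop] at h1
    exact h1
  refine ⟨?_, hperm⟩
  rw [heq]
  unfold pvDesc
  rw [List.pairwise_append]
  refine ⟨hdesc.sublist (List.take_sublist _ _), ?_, ?_⟩
  · rw [List.pairwise_cons]
    refine ⟨?_, hdesc.sublist (List.drop_sublist _ _)⟩
    intro x hx
    obtain ⟨j, hj, rfl⟩ := List.mem_iff_getElem.mp hx
    have hjlen : j < q.length - p := by
      have := List.length_drop (i := p) (l := q); omega
    have hlen : p + j < q.length := by omega
    rw [List.getElem_drop]
    have hnot : ¬ pvLt e q[p + j] := by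
      have := haft (p + j) (by omega) hlen
      rwa [List.getD_eq_getElem q _ hlen] at this
    have hneq : q[p + j] ≠ e := hne _ (List.getElem_mem _)
    rcases pvLt_total hneq with h | h
    · exact h
    · exact absurd h hnot
  · intro x hx y hy
    obtain ⟨j, hj, rfl⟩ := List.mem_iff_getElem.mp hx
    have hjp : j < p := by
      have := List.length_take (i := p) (l := q); omega
    have hjq : j < q.length := by omega
    rw [List.getElem_take]
    have hxj : pvLt e q[j] := by
      have := hbef j hjp
      rwa [List.getD_eq_getElem q _ hjq] at this
    rcases List.mem_cons.mp hy with rfl | hy'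
    · exact hxj
    · obtain ⟨j', hj', rfl⟩ := List.mem_iff_getElem.mp hy'
      have hlen : p + j' < q.length := by
        have := List.length_drop (i := p) (l := q); omega
      rw [List.getElem_drop]
      exact hpw j (p + j') hjq hlen (by omega)


theorem pvMinStay (f : Int → Int) (g : Option Int → Int → Option Int)
    (hg : ∀ m x, g (some m) x = if f x < f m then some x else some m) :
    ∀ (t : List Int) (a : Int), (∀ y ∈ t, ¬ f y < f a) →
    t.foldl g (some a) = some a := by
  intro t
  induction t with
  | nil => intro a _; rfl
  | cons y t ih =>
    intro a h
    simp only [List.foldl_cons, hg]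
    rw [if_neg (h y (by simp))]
    exact ih a (fun z hz => h z (by simp [hz]))

theorem pvMinMove (f : Int → Int) (g : Option Int → Int → Option Int)
    (hg : ∀ m x, g (some m) x = if f x < f m then some x else some m) :
    ∀ (t : List Int) (a m : Int), t.Pairwise (· < ·) → m ∈ t →
    f m < f a → (∀ y ∈ t, f m < f y ∨ (f m = f y ∧ m ≤ y)) →
    t.foldl g (some a) = some m := by
  intro t
  induction t with
  | nil => intro a m _ hm; simp at hm
  | cons y t ih =>
    intro a m hpw hm hlt hmin
    simp only [List.foldl_cons, hg]
    rcases List.mem_cons.mp hm with rfl | hm'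
    · rw [if_pos hlt]
      apply pvMinStay f g hg
      intro z hz
      rcases hmin z (by simp [hz]) with h | h
      · omega
      · omega
    · have hym : y < m := (List.pairwise_cons.mp hpw).1 m hm'
      have hfy : f m < f y := by
        rcases hmin y (by simp) with h | h
        · exact h
        · omega
      by_cases hya : f y < f a
      · rw [if_pos hya]
        exact ih y m (List.pairwise_cons.mp hpw).2 hm' hfy (fun z hz => hmin z (by simp [hz]))
      · rw [if_neg hya]
        exact ih a m (List.pairwise_cons.mp hpw).2 hm' hlt (fun z hz => hmin z (by simp [hz]))

theorem pvMinFirst (xs : List Int) (f : Int → Int) (m : Int)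
    (hs : xs.Pairwise (· < ·)) (hm : m ∈ xs)
    (hmin : ∀ y ∈ xs, f m < f y ∨ (f m = f y ∧ m ≤ y)) :
    PySem.List.min? xs f = some m := by
  rcases xs with _ | ⟨x, t⟩
  · simp at hm
  · unfold PySem.List.min?
    simp only [List.foldl_cons]
    show List.foldl _ (some x) t = some m
    rcases List.mem_cons.mp hm with rfl | hm'
    · exact pvMinStay f _ (fun _ _ => rfl) t m
        (fun z hz => by rcases hmin z (by simp [hz]) with h | h <;> omega)
    · have hxm : x < m := (List.pairwise_cons.mp hs).1 m hm'
      have hfx : f m < f x := by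
        rcases hmin x (by simp) with h | h
        · exact h
        · omega
      exact pvMinMove f _ (fun _ _ => rfl) t x m (List.pairwise_cons.mp hs).2 hm' hfx
        (fun z hz => hmin z (by simp [hz]))

theorem pvPopLast {α : Type} (q : List α) (h : q ≠ []) :
    PySem.List.pop? q = some (q.getLast h, q.dropLast) := by
  have hlen : 1 ≤ q.length := List.length_pos_iff.mpr h
  simp only [PySem.List.pop?, PySem.List.pyIdx?]
  rw [if_neg (by omega : ¬ ((0:Int) ≤ -1)), if_pos (by omega : -(q.length:Int) ≤ -1)]
  rw [show (-(-1 : Int)).toNat = 1 from rfl]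
  simp only [Option.bind]
  rw [List.getElem?_eq_getElem (by omega : q.length - 1 < q.length)]
  simp only [Option.map_some]
  congr 1
  refine Prod.ext ?_ ?_
  · exact (List.getLast_eq_getElem h).symm
  · show q.eraseIdx (q.length - 1) = q.dropLast
    rw [List.eraseIdx_eq_take_drop_succ,
      show q.length - 1 + 1 = q.length from by omega, List.drop_length, List.append_nil]
    exact List.dropLast_eq_take.symm

theorem pvMaxPerm (l1 l2 : List Int) (h : l1.Perm l2) :
    PySem.List.max? l1 (fun x => x) = PySem.List.max? l2 (fun x => x) := by
  rcases h1 : PySem.List.max? l1 (fun x => x) with _ | m1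
  · rw [PySem.List.max?_eq_none_iff] at h1
    subst h1
    rw [List.nil_perm.mp h]
    rfl
  · rcases h2 : PySem.List.max? l2 (fun x => x) with _ | m2
    · rw [PySem.List.max?_eq_none_iff] at h2
      subst h2
      rw [List.perm_nil.mp h] at h1
      rw [show PySem.List.max? ([] : List Int) (fun x => x) = none from rfl] at h1
      cases h1
    · have m1m : m1 ∈ l2 := h.mem_iff.mp (PySem.List.max?_mem h1)
      have m2m : m2 ∈ l1 := h.mem_iff.mpr (PySem.List.max?_mem h2)
      have le1 := PySem.List.max?_isMax h2 m1 m1m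
      have le2 := PySem.List.max?_isMax h1 m2 m2m
      simp only [Option.some.injEq]
      omega

-- the two loop bodies
def pvStepA (d : PySem.Dict Int Int) (c : Int) : PySem.Dict Int Int :=
  match PySem.List.min? d.keys (fun k => d.getD k 0) with
  | some next_open => d.modify next_open 0 (fun v => v + c)
  | none => d

def pvStepB (q : List (Int × Int)) (c : Int) : List (Int × Int) :=
  match PySem.List.pop? q with
  | some (e, rest) => pvPqInsert rest (e.1 + c, e.2)
  | none => q

def pvInv (d : PySem.Dict Int Int) (q : List (Int × Int)) : Prop :=
  d.items ≠ [] ∧ d.keys.Pairwise (· < ·) ∧ pvDesc q ∧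
  q.Perm (d.items.map (fun p => (p.2, p.1)))

theorem pvStep (d : PySem.Dict Int Int) (q : List (Int × Int)) (c : Int) (hinv : pvInv d q) :
    pvInv (pvStepA d c) (pvStepB q c) := by
  obtain ⟨hne, hkeys, hdesc, hperm⟩ := hinv
  have hknd : d.keys.Nodup := hkeys.imp (fun h => ne_of_lt h)
  have hitnd : d.items.Nodup := by
    have := hknd
    unfold PySem.Dict.keys at this
    exact this.of_map
  have hqnd : q.Nodup := hperm.nodup_iff.mpr (hitnd.map (fun a b hab => by
    simpa [Prod.ext_iff, and_comm] using hab))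
  have hqne : q ≠ [] := by
    intro h
    subst h
    have := List.nil_perm.mp hperm
    simp at this
    exact hne this
  -- the popped element
  set e0 := q.getLast hqne with he0
  have he0q : e0 ∈ q := List.getLast_mem hqne
  have he0it : (e0.2, e0.1) ∈ d.items := by
    have := hperm.subset he0q
    obtain ⟨p, hp, hpe⟩ := List.mem_map.mp this
    have h1 : p.2 = e0.1 := congrArg Prod.fst hpe
    have h2 : p.1 = e0.2 := congrArg Prod.snd hpe
    rwa [← h1, ← h2, Prod.mk.eta]
  have hkmem : e0.2 ∈ d.keys := by
    unfold PySem.Dict.keys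
    exact List.mem_map.mpr ⟨(e0.2, e0.1), he0it, rfl⟩
  have hgd : d.getD e0.2 0 = e0.1 := PySem.Dict.getD_of_mem_items d he0it hknd 0
  -- every other queue element is lex-greater than e0
  have hqsplit : q = q.dropLast ++ [e0] := (List.dropLast_append_getLast hqne).symm
  have hlastmin : ∀ x ∈ q.dropLast, pvLt e0 x := by
    have hd2 : (q.dropLast ++ [e0]).Pairwise (fun a b => pvLt b a) := by rw [← hqsplit]; exact hdesc
    intro x hx
    have := (List.pairwise_append.mp hd2).2.2 x hx e0 (by simp)
    exact this
  have he0nd : e0 ∉ q.dropLast := by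
    have := hqsplit ▸ hqnd
    have hda := List.disjoint_of_nodup_append this
    intro hx
    exact hda hx (by simp)
  -- A picks exactly e0's register
  have hminA : PySem.List.min? d.keys (fun k => d.getD k 0) = some e0.2 := by
    apply pvMinFirst d.keys _ e0.2 hkeys hkmem
    intro k hk
    obtain ⟨p, hp, hpk⟩ := List.mem_map.mp hk
    have hgk : d.getD k 0 = p.2 := by
      have : (k, p.2) ∈ d.items := by rwa [← hpk, Prod.mk.eta]
      exact PySem.Dict.getD_of_mem_items d this hknd 0
    have hswq : (p.2, p.1) ∈ q := hperm.mem_iff.mpr (List.mem_map.mpr ⟨p, hp, rfl⟩)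
    by_cases hpe : (p.2, p.1) = e0
    · right
      constructor
      · rw [hgd, hgk]; exact (congrArg Prod.fst hpe).symm
      · rw [← hpk]; exact le_of_eq (congrArg Prod.snd hpe).symm
    · have hdl : (p.2, p.1) ∈ q.dropLast := by
        have hin : (p.2, p.1) ∈ q.dropLast ++ [e0] := by rw [← hqsplit]; exact hswq
        rcases List.mem_append.mp hin with h | h
        · exact h
        · simp at h; exact absurd h hpe
      have := hlastmin _ hdl
      rcases this with h | ⟨h1, h2⟩
      · left; rw [hgd, hgk]; exact h
      · right
        constructor
        · rw [hgd, hgk]; exact h1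
        · rw [← hpk]; exact le_of_lt h2
  have hpop : PySem.List.pop? q = some (e0, q.dropLast) := pvPopLast q hqne
  -- unfold both steps
  rw [show pvStepA d c = d.insert e0.2 (e0.1 + c) from by
    unfold pvStepA
    rw [hminA]
    show d.insert e0.2 ((d.getD e0.2 0) + c) = _
    rw [hgd]]
  rw [show pvStepB q c = pvPqInsert q.dropLast (e0.1 + c, e0.2) from by
    unfold pvStepB
    rw [hpop]]
  -- decompose the items at key e0.2
  obtain ⟨l1, l2, hitems⟩ := List.append_of_mem he0it
  have hkeq : d.keys = l1.map Prod.fst ++ e0.2 :: l2.map Prod.fst := by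
    unfold PySem.Dict.keys
    rw [hitems]
    simp
  have hk1 : ∀ p ∈ l1, p.1 ≠ e0.2 := by
    intro p hp hcon
    have := hkeq ▸ hknd
    have h1 := (List.nodup_append.mp this).2.2
    exact h1 e0.2 (List.mem_map.mpr ⟨p, hp, hcon⟩) e0.2 (by simp) rfl
  have hk2 : ∀ p ∈ l2, p.1 ≠ e0.2 := by
    intro p hp hcon
    have := hkeq ▸ hknd
    have h1 := (List.nodup_append.mp this).2.1
    rw [List.nodup_cons] at h1
    exact h1.1 (List.mem_map.mpr ⟨p, hp, hcon⟩)
  have hcont : d.contains e0.2 = true := (PySem.Dict.contains_iff_mem_keys d e0.2).mpr hkmem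
  have hitems' : (d.insert e0.2 (e0.1 + c)).items = l1 ++ (e0.2, e0.1 + c) :: l2 := by
    rw [PySem.Dict.items_insert_of_contains d _ hcont, hitems]
    rw [List.map_append, List.map_cons]
    congr 1
    · apply List.map_congr_left ?_ |>.trans (List.map_id l1)
      intro p hp
      simp [hk1 p hp]
    · congr 1
      · simp
      · apply List.map_congr_left ?_ |>.trans (List.map_id l2)
        intro p hp
        simp [hk2 p hp]
  -- queue-side insert
  have hddesc : pvDesc q.dropLast := hdesc.sublist (List.dropLast_sublist q)
  have hfresh : ∀ x ∈ q.dropLast, x ≠ (e0.1 + c, e0.2) := by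
    intro x hx hcon
    subst hcon
    have hxq : (e0.1 + c, e0.2) ∈ q := (List.dropLast_sublist q).mem hx
    have hmem : (e0.2, e0.1 + c) ∈ d.items := by
      obtain ⟨p, hp, hpe⟩ := List.mem_map.mp (hperm.subset hxq)
      have h1 : p.2 = e0.1 + c := congrArg Prod.fst hpe
      have h2 : p.1 = e0.2 := congrArg Prod.snd hpe
      rwa [← h1, ← h2, Prod.mk.eta]
    have hge : d.getD e0.2 0 = e0.1 + c := PySem.Dict.getD_of_mem_items d hmem hknd 0
    rw [hgd] at hge
    have hc0 : c = 0 := by omega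
    subst hc0
    have hx' : (e0.1 + 0, e0.2) = e0 := by simp
    exact he0nd (hx' ▸ hx)
  obtain ⟨hdesc', hperm'⟩ := pvPqInsert_spec q.dropLast (e0.1 + c, e0.2) hddesc hfresh
  -- permutation bookkeeping
  have hqmap : q.Perm (l1.map (fun p => (p.2, p.1)) ++ e0 :: l2.map (fun p => (p.2, p.1))) := by
    have h := hperm
    rw [hitems] at h
    simpa using h
  have hdl_perm : q.dropLast.Perm (l1.map (fun p => (p.2, p.1)) ++ l2.map (fun p => (p.2, p.1))) := by
    have h0 : (e0 :: q.dropLast).Perm q := by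
      conv_rhs => rw [hqsplit]
      exact (List.perm_append_singleton e0 q.dropLast).symm
    exact ((h0.trans hqmap).trans List.perm_middle).cons_inv
  refine ⟨?_, ?_, hdesc', ?_⟩
  · rw [hitems']
    simp
  · have : (d.insert e0.2 (e0.1 + c)).keys = d.keys := by
      unfold PySem.Dict.keys
      rw [hitems', hitems]
      simp
    rw [this]
    exact hkeys
  · rw [hitems', List.map_append, List.map_cons]
    exact hperm'.trans ((hdl_perm.cons _).trans List.perm_middle.symm)

theorem pvFold (tail : List Int) : ∀ (d : PySem.Dict Int Int) (q : List (Int × Int)), pvInv d q →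
    pvInv (tail.foldl pvStepA d) (tail.foldl pvStepB q) := by
  induction tail with
  | nil => intro d q h; exact h
  | cons c t ih =>
    intro d q h
    exact ih _ _ (pvStep d q c h)

theorem pvInitQ (cust : List Int) : ∀ (r : Nat),
    pvDesc (((List.range r).map (fun (k : Nat) => (k : Int))).foldl
        (fun pq i => pvPqInsert pq (PySem.List.pyGetD cust i 0, i)) []) ∧
    (((List.range r).map (fun (k : Nat) => (k : Int))).foldl
        (fun pq i => pvPqInsert pq (PySem.List.pyGetD cust i 0, i)) []).Perm
      ((List.range r).map (fun (i : Nat) => (PySem.List.pyGetD cust (i : Int) 0, (i : Int)))) := by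
  intro r
  induction r with
  | zero => exact ⟨List.Pairwise.nil, List.Perm.refl _⟩
  | succ r ih =>
    obtain ⟨hd, hp⟩ := ih
    rw [List.range_succ, List.map_append, List.foldl_append, List.map_append]
    simp only [List.map_cons, List.map_nil, List.foldl_cons, List.foldl_nil]
    have hne : ∀ x ∈ ((List.range r).map (fun (k : Nat) => (k : Int))).foldl
        (fun pq i => pvPqInsert pq (PySem.List.pyGetD cust i 0, i)) [],
        x ≠ (PySem.List.pyGetD cust (r : Int) 0, (r : Int)) := by
      intro x hx hcon
      obtain ⟨i, hi, hie⟩ := List.mem_map.mp (hp.subset hx)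
      have h1 : ((i : Nat) : Int) = ((r : Nat) : Int) := by
        have := congrArg Prod.snd hie
        rw [hcon] at this
        exact this
      have h2 : i = r := by exact_mod_cast h1
      rw [List.mem_range] at hi
      omega
    obtain ⟨hd', hp'⟩ := pvPqInsert_spec _ _ hd hne
    refine ⟨hd', hp'.trans ?_⟩
    exact (hp.cons _).trans (List.perm_append_singleton _ _).symm

theorem pvMainBranch (customers : List Int) (registers : Int) (h2 : 2 ≤ registers)
    (hlt : registers < (customers.length : Int)) :
    get_checkout_time customers registers = get_checkout_time_alt customers registers := by
  have hr1 : ¬ registers = 1 := by omega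
  have hlen : ¬ (PySem.List.len customers ≤ registers) := by rw [PySem.List.len_eq]; omega
  set r : Nat := registers.toNat with hrdef
  have hreg : registers = (r : Int) := by omega
  unfold get_checkout_time get_checkout_time_alt
  rw [if_neg hr1, if_neg hr1, if_neg hlen, if_neg hlen]
  show (PySem.List.max?
      ((PySem.List.pyRange registers (PySem.List.len customers)).foldl
        (fun d j =>
          match PySem.List.min? d.keys (fun k => d.getD k 0) with
          | some next_open => d.modify next_open 0 (fun v => v + PySem.List.pyGetD customers j 0)
          | none => d)
        ((PySem.List.pyRange 0 registers).foldl
          (fun d i => d.insert i (PySem.List.pyGetD customers i 0)) PySem.Dict.empty)).values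
      (fun x => x)).getD 0 =
    (PySem.List.max?
      (((PySem.List.slice customers (some registers) none).foldl
        (fun pq c =>
          match PySem.List.pop? pq with
          | some (e, rest) => pvPqInsert rest (e.1 + c, e.2)
          | none => pq)
        ((PySem.List.pyRange 0 registers).foldl
          (fun pq i => pvPqInsert pq (PySem.List.pyGetD customers i 0, i)) [])).map Prod.fst)
      (fun x => x)).getD 0
  -- turn A's index loop into a fold over the dropped suffix
  rw [show (fun (d : PySem.Dict Int Int) (j : Int) =>
        match PySem.List.min? d.keys (fun k => d.getD k 0) with
        | some next_open => d.modify next_open 0 (fun v => v + PySem.List.pyGetD customers j 0)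
        | none => d) =
      (fun acc j => pvStepA acc (PySem.List.pyGetD customers j 0)) from rfl]
  rw [PySem.List.foldl_pyRange_pyGetD customers 0 pvStepA _ (by omega : (0:Int) ≤ registers)]
  -- turn B's slice into the same suffix and its body into pvStepB
  rw [PySem.List.slice_from customers (by omega : (0:Int) ≤ registers)]
  rw [show (fun (pq : List (Int × Int)) (c : Int) =>
        match PySem.List.pop? pq with
        | some (e, rest) => pvPqInsert rest (e.1 + c, e.2)
        | none => pq) = pvStepB from rfl]
  -- initial structures
  rw [hreg, Int.toNat_natCast, PySem.List.pyRange_zero_natCast r]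
  have hfresh2 : ∀ a ∈ (List.range r).map (fun (k : Nat) => (k : Int)),
      (PySem.Dict.empty : PySem.Dict Int Int).contains a = false := by
    intro a _
    exact PySem.Dict.contains_empty a
  have hnd2 : (((List.range r).map (fun (k : Nat) => (k : Int))).map (fun a => a)).Nodup := by
    have h1 : (((List.range r).map (fun (k : Nat) => (k : Int))).map (fun a => a))
        = (List.range r).map (fun (k : Nat) => (k : Int)) := List.map_id' _
    rw [h1, List.nodup_map_iff_inj_on (List.nodup_range)]
    intro a _ b _ hab
    exact_mod_cast hab
  have hitems0 := PySem.Dict.items_foldl_insert_fresh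
    ((List.range r).map (fun (k : Nat) => (k : Int))) (fun a => a)
    (fun a => PySem.List.pyGetD customers a 0) PySem.Dict.empty hfresh2 hnd2
  -- invariant at loop entry
  have hinv0 : pvInv
      (((List.range r).map (fun (k : Nat) => (k : Int))).foldl
        (fun d i => d.insert i (PySem.List.pyGetD customers i 0)) PySem.Dict.empty)
      (((List.range r).map (fun (k : Nat) => (k : Int))).foldl
        (fun pq i => pvPqInsert pq (PySem.List.pyGetD customers i 0, i)) []) := by
    obtain ⟨hd, hp⟩ := pvInitQ customers r
    refine ⟨?_, ?_, hd, ?_⟩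
    · rw [hitems0]
      have hr0 : r ≠ 0 := by omega
      simp [show (PySem.Dict.empty : PySem.Dict Int Int).items = ([] : List (Int × Int)) from rfl,
        List.range_eq_nil, hr0]
    · show (List.map Prod.fst _).Pairwise (· < ·)
      rw [hitems0]
      simp only [show (PySem.Dict.empty : PySem.Dict Int Int).items = ([] : List (Int × Int)) from rfl,
        List.nil_append, List.map_map]
      rw [List.pairwise_map]
      exact List.pairwise_lt_range.imp (fun h => by
        simp only [Function.comp_apply]
        exact_mod_cast h)
    · rw [hitems0]
      simp only [show (PySem.Dict.empty : PySem.Dict Int Int).items = ([] : List (Int × Int)) from rfl,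
        List.nil_append, List.map_map]
      exact hp
  obtain ⟨_, _, _, hpm⟩ := pvFold (customers.drop r) _ _ hinv0
  have hvperm : ((customers.drop r).foldl pvStepB
      (((List.range r).map (fun (k : Nat) => (k : Int))).foldl
        (fun pq i => pvPqInsert pq (PySem.List.pyGetD customers i 0, i)) [])).map Prod.fst |>.Perm
      (((customers.drop r).foldl pvStepA
      (((List.range r).map (fun (k : Nat) => (k : Int))).foldl
        (fun d i => d.insert i (PySem.List.pyGetD customers i 0)) PySem.Dict.empty)).values) := by
    refine (hpm.map Prod.fst).trans ?_
    rw [List.map_map]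
    unfold PySem.Dict.values
    exact List.Perm.refl _
  rw [pvMaxPerm _ _ hvperm]

-- ===== VERDICT (by name: the statement is the Claim_ definition above) =====
theorem get_checkout_time_spec : Claim_equal_get_checkout_time := by
  intro customers registers _hdom hpre
  unfold Spec_get_checkout_time
  by_cases h1 : registers = 1
  · unfold get_checkout_time get_checkout_time_alt
    rw [if_pos h1, if_pos h1]
  · by_cases h2 : PySem.List.len customers ≤ registers
    · unfold get_checkout_time get_checkout_time_alt
      rw [if_neg h1, if_neg h1, if_pos h2, if_pos h2]
    · have h2' : 2 ≤ registers := by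
        rcases hpre with h | ⟨_, h⟩
        · omega
        · exact h
      have hlt : registers < (customers.length : Int) := by
        rw [PySem.List.len_eq] at h2
        omega
      exact pvMainBranch customers registers h2' hlt
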